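-- pv_equiv track=rewrite | github.com/rhsCZ/unsloth | tests/test_multi_image_grpo_chunking.py | _simulate_chunk_indices
-- ===== SOURCE A (Python) =====
-- import math
--
-- def _simulate_chunk_indices(num_images, B):
--     total_samples = len(num_images)
--     batch_size = max(1, math.ceil(total_samples / B))
--     cum_imgs = [0]
--     for n in num_images:
--         cum_imgs.append(cum_imgs[-1] + n)
--     chunks = []
--     for start in range(0, total_samples, batch_size):
--         end = min(start + batch_size, total_samples)
--         chunks.append((start, end, cum_imgs[start], cum_imgs[end]))
--     return chunks
-- ===== SOURCE B (Python) =====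
-- import math
--
-- def _simulate_chunk_indices(num_images, B):
--     # Running-cumulative rewrite: no prefix-sum table; walk the windows once,
--     # keeping a single running image count and summing each window's slice.
--     total_samples = len(num_images)
--     batch_size = max(1, math.ceil(total_samples / B))
--     chunks = []
--     start = 0
--     running = 0
--     while start < total_samples:
--         end = min(start + batch_size, total_samples)
--         new_running = running + sum(num_images[start:end])
--         chunks.append((start, end, running, new_running))
--         start, running = end, new_running
--     return chunks
-- ===== Notes on version B (the rewrite author's own statement) =====
-- stated objective: simpler
-- what changed: B drops A's precomputed prefix-sum table and its index lookups: it consumes the list window by window with a single running cumulative count, summing each slice as it goes.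
-- outside the precondition, e.g. on _simulate_chunk_indices([1, 2], 0): A raises ZeroDivisionError, B raises ZeroDivisionError
import Mathlib
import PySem

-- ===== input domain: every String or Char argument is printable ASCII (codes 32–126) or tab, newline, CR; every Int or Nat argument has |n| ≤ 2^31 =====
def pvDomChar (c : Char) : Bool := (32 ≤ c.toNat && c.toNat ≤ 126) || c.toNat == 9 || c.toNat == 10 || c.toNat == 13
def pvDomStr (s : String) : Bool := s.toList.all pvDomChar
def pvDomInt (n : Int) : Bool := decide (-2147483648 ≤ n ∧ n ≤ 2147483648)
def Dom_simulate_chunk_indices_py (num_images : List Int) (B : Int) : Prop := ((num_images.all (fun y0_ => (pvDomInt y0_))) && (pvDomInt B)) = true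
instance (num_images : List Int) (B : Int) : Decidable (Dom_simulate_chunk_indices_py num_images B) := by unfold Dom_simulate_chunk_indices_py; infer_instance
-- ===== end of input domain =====

-- B replaces A's prefix-sum table + index lookups by a single running cumulative
-- count over slice windows (objective: simpler).

-- ===== PORT A =====
-- math.ceil(total/B) is ported as the exact ceiling -((-total)//B); exact on
-- the Dom sizes (|total| and |B| small enough that float division rounds true).
def simulate_chunk_indices_py (num_images : List Int) (B : Int) : List (Int × Int × Int × Int) :=
  let total : Int := (num_images.length : Int)
  let batch_size : Int := max 1 (-(PySem.Int.floordiv (-total) B))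
  let cum_imgs : List Int :=
    num_images.foldl (fun acc n => acc ++ [PySem.List.pyGetD acc (-1) 0 + n]) [0]
  (PySem.List.pyRange 0 total batch_size).foldl
    (fun chunks start =>
      let e := min (start + batch_size) total
      chunks ++ [(start, e, PySem.List.pyGetD cum_imgs start 0, PySem.List.pyGetD cum_imgs e 0)]) []

-- ===== PORT B =====
-- the 'while start < total_samples:' loop of Source B; fuel only makes the
-- recursion total (callers pass enough: each step advances start by ≥ 1)
def altGo (xs : List Int) (fuel : Nat) (start running bs : Int) : List (Int × Int × Int × Int) :=
  match fuel with
  | 0 => []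
  | Nat.succ f =>
    if start < (xs.length : Int) then
      let e := min (start + bs) (xs.length : Int)
      let newR := running + (PySem.List.slice xs (some start) (some e)).sum
      (start, e, running, newR) :: altGo xs f e newR bs
    else []

def simulate_chunk_indices_py_alt (num_images : List Int) (B : Int) : List (Int × Int × Int × Int) :=
  let total : Int := (num_images.length : Int)
  let batch_size : Int := max 1 (-(PySem.Int.floordiv (-total) B))
  altGo num_images (num_images.length + 1) 0 0 batch_size

-- ===== PRECONDITION & SPEC =====
-- Pre_ excludes only B = 0, where Python A raises ZeroDivisionError.
def Pre_simulate_chunk_indices_py (num_images : List Int) (B : Int) : Prop := B ≠ 0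
instance (num_images : List Int) (B : Int) : Decidable (Pre_simulate_chunk_indices_py num_images B) := by unfold Pre_simulate_chunk_indices_py; infer_instance
def pvWitness_simulate_chunk_indices_py : List Int × Int := ([1, 2, 3], 2)

def Spec_simulate_chunk_indices_py (num_images : List Int) (B : Int) (out : List (Int × Int × Int × Int)) : Prop := out = simulate_chunk_indices_py_alt num_images B
instance (num_images : List Int) (B : Int) (out : List (Int × Int × Int × Int)) : Decidable (Spec_simulate_chunk_indices_py num_images B out) := by unfold Spec_simulate_chunk_indices_py; infer_instance

-- ===== CLAIM (what is proved, stated in full; the proofs are below) =====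
def Claim_equal_simulate_chunk_indices_py : Prop := ∀ (num_images : List Int) (B : Int), Dom_simulate_chunk_indices_py num_images B → Pre_simulate_chunk_indices_py num_images B → Spec_simulate_chunk_indices_py num_images B (simulate_chunk_indices_py num_images B)

-- ===== LEMMAS AND PROOFS =====

-- the prefix-sum list A builds, in structural form
def scanSum (c : Int) : List Int → List Int
  | [] => [c]
  | x :: t => c :: scanSum (c + x) t

lemma foldA_scan (xs : List Int) : ∀ (acc : List Int) (c : Int),
    xs.foldl (fun a n => a ++ [PySem.List.pyGetD a (-1) 0 + n]) (acc ++ [c])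
      = acc ++ scanSum c xs := by
  induction xs with
  | nil => intro acc c; simp [scanSum]
  | cons x t ih =>
    intro acc c
    simp only [List.foldl_cons, PySem.List.pyGetD_neg_one_append_singleton]
    have : (acc ++ [c]) ++ [c + x] = (acc ++ [c]) ++ [c + x] := rfl
    rw [show acc ++ [c] ++ [c + x] = (acc ++ [c]) ++ [c + x] from rfl, ih]
    simp [scanSum]

lemma cum_eq (xs : List Int) :
    xs.foldl (fun a n => a ++ [PySem.List.pyGetD a (-1) 0 + n]) [0]
      = scanSum 0 xs := by
  simpa using foldA_scan xs [] 0

lemma scan_get (xs : List Int) : ∀ (c : Int) (i : Nat), i ≤ xs.length →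
    PySem.List.pyGetD (scanSum c xs) (i : Int) 0 = c + (xs.take i).sum := by
  induction xs with
  | nil =>
    intro c i hi
    have hz : i = 0 := by simpa using hi
    subst hz
    simp [scanSum]
  | cons x t ih =>
    intro c i hi
    cases i with
    | zero => simp [scanSum]
    | succ j =>
      have ihj := ih (c + x) j (by simpa using hi)
      rw [PySem.List.pyGetD_natCast] at ihj ⊢
      simp only [scanSum, List.getD_cons_succ, List.take_succ_cons, List.sum_cons]
      rw [ihj]
      ring

lemma pyRange_pos_nil {a b s : Int} (hs : 0 < s) (h : b ≤ a) :
    PySem.List.pyRange a b s = [] := by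
  rw [PySem.List.pyRange_of_pos a b hs]
  simp [show ¬ a < b by omega]

lemma pyRange_pos_cons {a b s : Int} (hs : 0 < s) (h : a < b) :
    PySem.List.pyRange a b s = a :: PySem.List.pyRange (a + s) b s := by
  rw [PySem.List.pyRange_of_pos a b hs, PySem.List.pyRange_of_pos (a + s) b hs]
  have hdiv : (b - a + s - 1) / s = (b - a - 1) / s + 1 := by
    have := Int.add_mul_ediv_right (b - a - 1) 1 (by omega : s ≠ 0)
    have e : b - a + s - 1 = b - a - 1 + 1 * s := by ring
    rw [e, this]
  have hnn : 0 ≤ (b - a - 1) / s := Int.ediv_nonneg (by omega) (by omega)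
  by_cases hb : a + s < b
  · have : ((b - a + s - 1) / s).toNat = ((b - (a + s) + s - 1) / s).toNat + 1 := by
      have e2 : b - (a + s) + s - 1 = b - a - 1 := by ring
      rw [e2, hdiv]; omega
    rw [this]
    simp only [h, hb, if_true, List.range_succ_eq_map, List.map_cons, List.map_map]
    refine congrArg₂ List.cons (by ring) ?_
    apply List.map_congr_left; intro k _; simp [Function.comp]; ring
  · have hz : (b - a - 1) / s = 0 :=
      Int.ediv_eq_zero_of_lt (by omega) (by omega)
    have : ((b - a + s - 1) / s).toNat = 1 := by rw [hdiv, hz]; rfl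
    rw [this]
    simp [h, show ¬ (a + s) < b from hb]

lemma chunk_main (xs : List Int) (bs : Int) (hbs : 1 ≤ bs) :
    ∀ (d k fuel : Nat) (acc : List (Int × Int × Int × Int)),
      xs.length - k = d → xs.length - k < fuel →
    (PySem.List.pyRange (k : Int) (xs.length : Int) bs).foldl
      (fun chunks start =>
        chunks ++ [(start, min (start + bs) (xs.length : Int),
          PySem.List.pyGetD (scanSum 0 xs) start 0,
          PySem.List.pyGetD (scanSum 0 xs) (min (start + bs) (xs.length : Int)) 0)]) acc
      = acc ++ altGo xs fuel (k : Int) ((xs.take k).sum) bs := by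
  intro d
  induction d using Nat.strong_induction_on with
  | _ d IH =>
    intro k fuel acc hd hfuel
    obtain ⟨f, rfl⟩ : ∃ f, fuel = f + 1 := ⟨fuel - 1, by omega⟩
    by_cases hk : xs.length ≤ k
    · rw [pyRange_pos_nil (by omega) (by exact_mod_cast hk)]
      rw [show altGo xs (f + 1) (k : Int) ((xs.take k).sum) bs = [] by
        rw [altGo]
        rw [if_neg (by exact_mod_cast not_lt.mpr hk)]]
      simp
    · rw [not_le] at hk
      set n := xs.length with hn
      have hbsN : 1 ≤ bs.toNat := by omega
      have hcast : (bs.toNat : Int) = bs := by omega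
      set kN' : Nat := min (k + bs.toNat) n with hk'
      have hkk' : k < kN' ∧ kN' ≤ n := by rw [hk']; omega
      have hemin : min ((k : Int) + bs) (n : Int) = (kN' : Int) := by
        rw [hk']; push_cast; omega
      -- fold side: peel one range element
      rw [pyRange_pos_cons (by omega) (by exact_mod_cast hk), List.foldl_cons]
      have hrw : PySem.List.pyRange ((k : Int) + bs) (n : Int) bs
          = PySem.List.pyRange (kN' : Int) (n : Int) bs := by
        by_cases hle : k + bs.toNat ≤ n
        · have : (kN' : Int) = (k : Int) + bs := by rw [hk']; push_cast; omega
          rw [this]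
        · rw [pyRange_pos_nil (by omega) (by push_cast; omega),
            pyRange_pos_nil (by omega) (by rw [hk']; omega)]
      rw [hrw, IH (n - kN') (by omega) kN' f _ rfl (by omega)]
      -- altGo side: one iteration of the while loop
      have htake : xs.take (k + bs.toNat) = xs.take kN' := by
        by_cases hle : k + bs.toNat ≤ n
        · rw [hk']; congr 1; omega
        · rw [List.take_of_length_le (by omega), List.take_of_length_le (by rw [hk']; omega)]
      have hslice : PySem.List.slice xs (some (k : Int)) (some (kN' : Int))
          = (xs.drop k).take (kN' - k) := PySem.List.slice_natCast xs k kN'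
      have hsum : (xs.take k).sum + ((xs.drop k).take (kN' - k)).sum = (xs.take kN').sum := by
        have h1 : (xs.drop k).take (kN' - k) = (xs.drop k).take bs.toNat := by
          rw [List.take_eq_take_iff]; rw [hk']; simp; omega
        rw [h1, ← List.sum_append, ← List.take_add, htake]
      conv_rhs => rw [altGo]
      rw [hemin, if_pos (show ((k : Nat) : Int) < ((xs.length : Nat) : Int) by
        exact_mod_cast hk)]
      simp only [hslice, scan_get xs 0 k (by omega : k ≤ xs.length),
        scan_get xs 0 kN' (by omega : kN' ≤ xs.length)]
      simp [hsum]

-- ===== VERDICT (by name: the statement is the Claim_ definition above) =====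
theorem simulate_chunk_indices_py_spec : Claim_equal_simulate_chunk_indices_py := by
  intro xs B _ _
  unfold Spec_simulate_chunk_indices_py simulate_chunk_indices_py simulate_chunk_indices_py_alt
  simp only [cum_eq]
  have h := chunk_main xs (max 1 (-(PySem.Int.floordiv (-(xs.length : Int)) B)))
    (le_max_left _ _) xs.length 0 (xs.length + 1) [] (by omega) (by omega)
  simpa using h
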